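-- pv_equiv track=rewrite | github.com/Ziqiao-git/CSE-291_serverless_llm | simulation.py | pick_best_model
-- ===== SOURCE A (Python) =====
-- def pick_best_model(queues):
--     """
--     Returns the index of the model that currently has the largest queue.
--     If all queues are empty, returns None.
--     """
--     max_len = 0
--     best_model = None
--     for m, q in enumerate(queues):
--         if len(q) > max_len:
--             max_len = len(q)
--             best_model = m
--     return best_model
-- ===== SOURCE B (Python) =====
-- def pick_best_model(queues):
--     lengths = [len(q) for q in queues]
--     if not lengths:
--         return None
--     m = max(lengths)
--     if m == 0:
--         return None
--     return lengths.index(m)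
-- ===== Notes on version B (the rewrite author's own statement) =====
-- stated objective: simpler
-- what changed: Replaces the fused single-pass argmax loop with explicit state by a multi-pass decomposition: build the list of queue lengths, guard the empty/all-empty case, then return lengths.index(max(lengths)).
import Mathlib
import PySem

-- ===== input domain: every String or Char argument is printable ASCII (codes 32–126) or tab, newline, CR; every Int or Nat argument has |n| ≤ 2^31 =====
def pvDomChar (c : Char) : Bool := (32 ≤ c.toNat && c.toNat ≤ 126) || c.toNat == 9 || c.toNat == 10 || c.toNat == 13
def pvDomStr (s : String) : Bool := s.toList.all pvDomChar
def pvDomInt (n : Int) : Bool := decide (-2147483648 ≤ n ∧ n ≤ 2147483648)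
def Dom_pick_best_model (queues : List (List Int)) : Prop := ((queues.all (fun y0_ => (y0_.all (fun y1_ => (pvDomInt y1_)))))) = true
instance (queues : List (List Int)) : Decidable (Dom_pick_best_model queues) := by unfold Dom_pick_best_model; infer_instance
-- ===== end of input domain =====

-- B is simpler: it builds the list of queue lengths, guards the empty/all-empty case, and returns
-- the first index of the maximum length, instead of A's fused argmax loop with explicit state.

-- ===== PORT A =====
-- loop body of A: state (max_len, best_model), element (m, q) from enumerate(queues)
def pvStepA (st : Int × Option Int) (mq : Int × List Int) : Int × Option Int :=
  if (mq.2.length : Int) > st.1 then ((mq.2.length : Int), some mq.1) else st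

def pick_best_model (queues : List (List Int)) : Option Int :=
  ((PySem.List.enumerate queues 0).foldl pvStepA ((0 : Int), (none : Option Int))).2

-- ===== PORT B =====
def pick_best_model_alt (queues : List (List Int)) : Option Int :=
  let lengths : List Int := queues.map (fun q => (q.length : Int))
  match PySem.List.max? lengths (fun x => x) with
  | none => none
  | some m => if m = 0 then none else (PySem.List.index? lengths m).map (fun i => (i : Int))

-- ===== PRECONDITION & SPEC =====
def Spec_pick_best_model (queues : List (List Int)) (out : Option Int) : Prop := out = pick_best_model_alt queues
instance (queues : List (List Int)) (out : Option Int) : Decidable (Spec_pick_best_model queues out) := by unfold Spec_pick_best_model; infer_instance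

-- ===== CLAIM (what is proved, stated in full; the proofs are below) =====
def Claim_equal_pick_best_model : Prop := ∀ (queues : List (List Int)), Dom_pick_best_model queues → Spec_pick_best_model queues (pick_best_model queues)

-- ===== LEMMAS AND PROOFS =====

lemma pv_foldl_max_comm : ∀ (t : List Int) (x y : Int), t.foldl max (max x y) = max x (t.foldl max y) := by
  intro t
  induction t with
  | nil => intro x y; simp
  | cons z t ih =>
    intro x y
    simp only [List.foldl_cons]
    rw [max_assoc, ih]

lemma pv_max?_id_cons' (x : Int) (l : List Int) :
    PySem.List.max? (x :: l) (fun y => y) =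
      some (match PySem.List.max? l (fun y => y) with | none => x | some m => max x m) := by
  cases l with
  | nil => simp [PySem.List.max?_id_cons]; rfl
  | cons y t =>
    rw [PySem.List.max?_id_cons, PySem.List.max?_id_cons]
    simp only [List.foldl_cons]
    rw [pv_foldl_max_comm]

-- characterisation of A's fold result in terms of max/first-index over the length list
def pvResSpec (L : List Int) (off c : Int) (b : Option Int) : Option Int :=
  match PySem.List.max? L (fun x => x) with
  | none => b
  | some M => if M ≤ c then b else (PySem.List.index? L M).map (fun i => off + (i : Int))

lemma pv_aux : ∀ (queues : List (List Int)) (off c : Int) (b : Option Int),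
    ((PySem.List.enumerate queues off).foldl pvStepA (c, b)).2 =
      pvResSpec (queues.map fun q => (q.length : Int)) off c b := by
  intro queues
  induction queues with
  | nil => intro off c b; simp [PySem.List.enumerate_nil, pvResSpec]; rfl
  | cons q t ih =>
    intro off c b
    rw [PySem.List.enumerate_cons]
    simp only [List.foldl_cons, List.map_cons]
    show ((PySem.List.enumerate t (off + 1)).foldl pvStepA (pvStepA (c, b) (off, q))).2 = _
    by_cases h : (q.length : Int) > c
    · rw [show pvStepA (c, b) (off, q) = ((q.length : Int), some off) from by
        simp [pvStepA, h], ih]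
      unfold pvResSpec
      rw [pv_max?_id_cons']
      cases hm : PySem.List.max? (t.map fun q => ((q.length : Nat) : Int)) (fun y => y) with
      | none =>
        simp only [hm]
        rw [if_neg (not_le.mpr h), PySem.List.index?_cons_self]
        simp
      | some M' =>
        simp only [hm]
        by_cases h2 : M' ≤ (q.length : Int)
        · rw [if_pos h2, max_eq_left h2, if_neg (not_le.mpr h), PySem.List.index?_cons_self]
          simp
        · have hlt : (q.length : Int) < M' := lt_of_not_ge h2
          rw [if_neg h2, max_eq_right (le_of_lt hlt),
              if_neg (not_le.mpr (lt_trans h hlt)),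
              PySem.List.index?_cons_of_ne _ (ne_of_lt hlt)]
          cases hidx : PySem.List.index? (t.map fun q => ((q.length : Nat) : Int)) M' with
          | none => simp [hidx]
          | some k => simp [hidx]; ring
    · rw [show pvStepA (c, b) (off, q) = (c, b) from by simp [pvStepA, h], ih]
      have hle : (q.length : Int) ≤ c := not_lt.mp h
      unfold pvResSpec
      rw [pv_max?_id_cons']
      cases hm : PySem.List.max? (t.map fun q => ((q.length : Nat) : Int)) (fun y => y) with
      | none =>
        simp only [hm]
        rw [if_pos hle]
      | some M' =>
        simp only [hm]
        by_cases h2 : M' ≤ c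
        · rw [if_pos h2, if_pos (max_le hle h2)]
        · have hlt : c < M' := lt_of_not_ge h2
          have hqlt : (q.length : Int) < M' := lt_of_le_of_lt hle hlt
          rw [if_neg h2, max_eq_right (le_of_lt hqlt), if_neg h2,
              PySem.List.index?_cons_of_ne _ (ne_of_lt hqlt)]
          cases hidx : PySem.List.index? (t.map fun q => ((q.length : Nat) : Int)) M' with
          | none => simp [hidx]
          | some k => simp [hidx]; ring

-- ===== VERDICT (by name: the statement is the Claim_ definition above) =====
theorem pick_best_model_spec : Claim_equal_pick_best_model := by
  intro queues _
  unfold Spec_pick_best_model pick_best_model pick_best_model_alt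
  rw [pv_aux]
  unfold pvResSpec
  cases hm : PySem.List.max? (queues.map fun q => ((q.length : Nat) : Int)) (fun y => y) with
  | none => simp [hm]
  | some M =>
    have hmem := PySem.List.max?_mem hm
    obtain ⟨q, -, hq⟩ := List.mem_map.mp hmem
    have h0 : 0 ≤ M := by rw [← hq]; positivity
    simp only [hm]
    by_cases hz : M = 0
    · rw [if_pos (by omega), if_pos hz]
    · rw [if_neg (by omega), if_neg hz]
      cases PySem.List.index? (queues.map fun q => ((q.length : Nat) : Int)) M with
      | none => simp
      | some k => simp
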